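-- pv_equiv track=rewrite | github.com/fa-yoshinobu/pytoyopuc-computerlink | toyopuc/client.py | _iter_fr_segments
-- ===== SOURCE A (Python) =====
-- _FR_BLOCK_WORDS = 0x8000
--
-- _FR_MAX_INDEX = 0x1FFFFF
--
-- def _validate_fr_index(index: int) -> int:
--     idx = int(index)
--     if idx < 0 or idx > _FR_MAX_INDEX:
--         raise ValueError('FR index out of range (0x000000-0x1FFFFF)')
--     return idx
--
-- def _iter_fr_segments(start_index: int, word_count: int):
--     index = _validate_fr_index(start_index)
--     remaining = int(word_count)
--     if remaining < 1:
--         raise ValueError('word_count must be >= 1')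
--     while remaining > 0:
--         block_offset = index % _FR_BLOCK_WORDS
--         chunk = min(remaining, _FR_BLOCK_WORDS - block_offset)
--         yield index, chunk
--         index += chunk
--         remaining -= chunk
-- ===== SOURCE B (Python) =====
-- _FR_BLOCK_WORDS = 0x8000
-- _FR_MAX_INDEX = 0x1FFFFF
--
--
-- def _iter_fr_segments(start_index: int, word_count: int):
--     index = int(start_index)
--     if index < 0 or index > _FR_MAX_INDEX:
--         raise ValueError('FR index out of range (0x000000-0x1FFFFF)')
--     remaining = int(word_count)
--     if remaining < 1:
--         raise ValueError('word_count must be >= 1')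
--     # head: the (possibly partial) segment up to the next block boundary
--     first = min(remaining, _FR_BLOCK_WORDS - index % _FR_BLOCK_WORDS)
--     yield index, first
--     index += first
--     remaining -= first
--     # index is now block-aligned: emit the full blocks, then the tail
--     full_blocks, tail = divmod(remaining, _FR_BLOCK_WORDS)
--     for _ in range(full_blocks):
--         yield index, _FR_BLOCK_WORDS
--         index += _FR_BLOCK_WORDS
--     if tail:
--         yield index, tail
-- ===== Notes on version B (the rewrite author's own statement) =====
-- stated objective: alternative
-- what changed: Replaces the single while-loop with a repeated min/mod accumulator by a head/range-loop/tail decomposition: one partial head chunk computed up front, then divmod gives the number of full blocks emitted by a for-range loop, then one tail chunk.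
import Mathlib
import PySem

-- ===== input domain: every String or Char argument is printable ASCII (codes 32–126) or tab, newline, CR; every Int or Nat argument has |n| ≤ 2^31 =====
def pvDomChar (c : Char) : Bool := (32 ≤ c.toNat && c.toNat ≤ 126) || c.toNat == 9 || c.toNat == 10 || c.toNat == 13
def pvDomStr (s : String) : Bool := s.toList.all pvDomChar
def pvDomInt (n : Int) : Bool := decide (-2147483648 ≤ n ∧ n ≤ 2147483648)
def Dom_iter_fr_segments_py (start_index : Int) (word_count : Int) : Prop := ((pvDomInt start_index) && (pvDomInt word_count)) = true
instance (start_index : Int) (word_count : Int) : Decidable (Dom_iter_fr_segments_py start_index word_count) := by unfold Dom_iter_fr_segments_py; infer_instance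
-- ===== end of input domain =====

-- B replaces A's single while-loop (re-deriving the block offset each pass) by a
-- head / for-range-of-full-blocks / tail decomposition computed via one divmod.
-- Equivalence of the RETURN sequence only; A and B are generators, Pre_ excludes the raising inputs.

-- ===== PORT A =====
-- A's while-loop: remaining decreases by chunk ≥ 1 each pass
def pvLoopA (index remaining : Int) : List (Int × Int) :=
  if h : remaining > 0 then
    let block_offset := PySem.Int.mod index 32768
    let chunk := min remaining (32768 - block_offset)
    (index, chunk) :: pvLoopA (index + chunk) (remaining - chunk)
  else []
termination_by remaining.toNat
decreasing_by
  have hm := PySem.Int.mod_eq_emod_of_pos (a := index) (b := 32768) (by omega)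
  have h1 : 0 ≤ index % 32768 := Int.emod_nonneg _ (by omega)
  have h2 : index % 32768 < 32768 := Int.emod_lt_of_pos _ (by omega)
  simp only [hm] at *
  omega

def iter_fr_segments_py (start_index : Int) (word_count : Int) : List (Int × Int) :=
  if start_index < 0 ∨ start_index > 0x1FFFFF then []   -- ValueError: excluded by Pre_
  else if word_count < 1 then []                        -- ValueError: excluded by Pre_
  else pvLoopA start_index word_count

-- ===== PORT B =====
-- B's `for _ in range(full_blocks)` loop, carrying the advancing index
def pvFullBlocks (n : Nat) (index : Int) : List (Int × Int) :=
  match n with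
  | 0 => []
  | n + 1 => (index, 32768) :: pvFullBlocks n (index + 32768)

def iter_fr_segments_py_alt (start_index : Int) (word_count : Int) : List (Int × Int) :=
  if start_index < 0 ∨ start_index > 0x1FFFFF then []   -- ValueError: excluded by Pre_
  else if word_count < 1 then []                        -- ValueError: excluded by Pre_
  else
    let first := min word_count (32768 - PySem.Int.mod start_index 32768)
    let index := start_index + first
    let remaining := word_count - first
    let full_blocks := PySem.Int.floordiv remaining 32768
    let tail := PySem.Int.mod remaining 32768
    ((start_index, first) :: pvFullBlocks full_blocks.toNat index) ++
      (if tail ≠ 0 then [(index + 32768 * full_blocks, tail)] else [])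

-- ===== PRECONDITION & SPEC =====
-- Pre_ excludes exactly the inputs on which A raises ValueError (index out of 0..0x1FFFFF, word_count < 1).
def Pre_iter_fr_segments_py (start_index : Int) (word_count : Int) : Prop :=
  0 ≤ start_index ∧ start_index ≤ 0x1FFFFF ∧ 1 ≤ word_count
instance (start_index : Int) (word_count : Int) : Decidable (Pre_iter_fr_segments_py start_index word_count) := by
  unfold Pre_iter_fr_segments_py; infer_instance
def pvWitness_iter_fr_segments_py : Int × Int := (32700, 70000)

def Spec_iter_fr_segments_py (start_index : Int) (word_count : Int) (out : List (Int × Int)) : Prop := out = iter_fr_segments_py_alt start_index word_count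
instance (start_index : Int) (word_count : Int) (out : List (Int × Int)) : Decidable (Spec_iter_fr_segments_py start_index word_count out) := by unfold Spec_iter_fr_segments_py; infer_instance

-- ===== CLAIM (what is proved, stated in full; the proofs are below) =====
def Claim_equal_iter_fr_segments_py : Prop := ∀ (start_index : Int) (word_count : Int), Dom_iter_fr_segments_py start_index word_count → Pre_iter_fr_segments_py start_index word_count → Spec_iter_fr_segments_py start_index word_count (iter_fr_segments_py start_index word_count)

-- ===== LEMMAS AND PROOFS =====

theorem pvLoopA_unfold (index remaining : Int) (h : remaining > 0) :
    pvLoopA index remaining =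
      (index, min remaining (32768 - PySem.Int.mod index 32768)) ::
        pvLoopA (index + min remaining (32768 - PySem.Int.mod index 32768))
                (remaining - min remaining (32768 - PySem.Int.mod index 32768)) := by
  rw [pvLoopA]; simp [h]

theorem pvLoopA_zero (index : Int) : pvLoopA index 0 = [] := by
  rw [pvLoopA]; simp

-- A's loop from a block-aligned index equals B's full-blocks run followed by the tail
theorem pvLoopA_aligned (n : Nat) : ∀ (index remaining : Int),
    remaining.toNat = n → 0 ≤ remaining → index % 32768 = 0 →
    pvLoopA index remaining =
      pvFullBlocks (remaining / 32768).toNat index ++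
        (if remaining % 32768 ≠ 0 then [(index + 32768 * (remaining / 32768), remaining % 32768)] else []) := by
  induction n using Nat.strong_induction_on with
  | _ n ih =>
    intro index remaining hn h0 halign
    rcases lt_or_ge remaining 1 with hlt | hge
    · have hr0 : remaining = 0 := by omega
      subst hr0
      simp [pvLoopA_zero, pvFullBlocks]
    · have hm := PySem.Int.mod_eq_emod_of_pos (a := index) (b := 32768) (by omega)
      rw [pvLoopA_unfold index remaining (by omega), hm, halign]
      rcases lt_or_ge remaining 32768 with hsmall | hbig
      · -- final partial chunk
        have hmin : min remaining (32768 - 0) = remaining := by omega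
        rw [hmin]
        have hdiv : remaining / 32768 = 0 := Int.ediv_eq_zero_of_lt (by omega) (by omega)
        have hmod : remaining % 32768 = remaining := Int.emod_eq_of_lt (by omega) (by omega)
        simp [hdiv, hmod, pvFullBlocks, pvLoopA_zero, (show remaining ≠ 0 by omega)]
      · -- full block, recurse
        have hmin : min remaining (32768 - 0) = 32768 := by omega
        rw [hmin]
        have halign' : (index + 32768) % 32768 = 0 := by omega
        have hrec := ih (remaining - 32768).toNat (by omega) (index + 32768) (remaining - 32768)
          rfl (by omega) halign'
        rw [hrec]
        have hdiv : remaining / 32768 = (remaining - 32768) / 32768 + 1 := by omega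
        have hmod : remaining % 32768 = (remaining - 32768) % 32768 := by omega
        have htn : (remaining / 32768).toNat = ((remaining - 32768) / 32768).toNat + 1 := by
          have : 0 ≤ (remaining - 32768) / 32768 := Int.ediv_nonneg (by omega) (by omega)
          omega
        rw [htn, hmod, hdiv]
        simp only [pvFullBlocks]
        have : 0 ≤ (remaining - 32768) / 32768 := Int.ediv_nonneg (by omega) (by omega)
        have hidx : index + 32768 + 32768 * ((remaining - 32768) / 32768) =
            index + 32768 * ((remaining - 32768) / 32768 + 1) := by ring
        simp only [List.cons_append, hidx]

-- ===== VERDICT (by name: the statement is the Claim_ definition above) =====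
theorem iter_fr_segments_py_spec : Claim_equal_iter_fr_segments_py := by
  intro s w _ hpre
  obtain ⟨h0, h1, h2⟩ := hpre
  unfold Spec_iter_fr_segments_py iter_fr_segments_py iter_fr_segments_py_alt
  have hns : ¬ (s < 0 ∨ s > 0x1FFFFF) := by omega
  simp only [hns, if_false, (show ¬ w < 1 by omega), if_false]
  have hm := PySem.Int.mod_eq_emod_of_pos (a := s) (b := 32768) (by omega)
  simp only [hm]
  have hsm0 : 0 ≤ s % 32768 := Int.emod_nonneg _ (by omega)
  have hsm1 : s % 32768 < 32768 := Int.emod_lt_of_pos _ (by omega)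
  set first := min w (32768 - s % 32768) with hfirst
  have hf1 : 1 ≤ first := by omega
  rw [pvLoopA_unfold s w (by omega), hm, ← hfirst]
  rcases lt_or_ge w (32768 - s % 32768) with hsmall | hbig
  · -- first chunk consumes everything: remaining = 0, no blocks, no tail
    have : first = w := by omega
    rw [this]
    simp [pvLoopA_zero, pvFullBlocks]
  · -- remaining after head is block-aligned
    have hfb : first = 32768 - s % 32768 := by omega
    have halign : (s + first) % 32768 = 0 := by omega
    rw [pvLoopA_aligned (w - first).toNat (s + first) (w - first) rfl (by omega) halign,
      PySem.Int.floordiv_eq_ediv_of_pos (a := w - first) (b := 32768) (by omega),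
      PySem.Int.mod_eq_emod_of_pos (a := w - first) (b := 32768) (by omega)]
    simp [List.cons_append]
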